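-- pv_equiv track=rewrite | github.com/wyk18703232953/myResearch | codeComplex/data/onlyCode/python/nlogn/python_nlogn_0201.py | check
-- ===== SOURCE A (Python) =====
-- def check(k, b, T):
-- 	c = [e for e in b if e[0] >= k]
--
-- 	if len(c) < k:
-- 		return False, None
--
-- 	first_k_probs = c[:k]
-- 	s = sum([e[1] for e in first_k_probs])
--
-- 	if s > T:
-- 		return False, None
--
-- 	return True, first_k_probs
-- ===== SOURCE B (Python) =====
-- def check(k, b, T):
--     r = _pick(k, k, b)
--     if r is None:
--         return False, None
--     lst, s = r
--     if s > T:
--         return False, None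
--     return True, lst
--
--
-- def _pick(k, need, items):
--     # returns (chosen, prob_sum) for the first `need` items with e[0] >= k,
--     # or None if there are not enough of them
--     if need <= 0:
--         return [], 0
--     if not items:
--         return None
--     e = items[0]
--     if e[0] >= k:
--         r = _pick(k, need - 1, items[1:])
--         if r is None:
--             return None
--         lst, s = r
--         return [e] + lst, s + e[1]
--     return _pick(k, need, items[1:])
-- ===== Notes on version B (the rewrite author's own statement) =====
-- stated objective: alternative
-- what changed: B replaces A's staged filter/length-check/slice/re-sum pipeline by a recursive selector with a decreasing need-counter that propagates shortage as None and builds the chosen list by cons while unwinding, so no filtered list, slice or length comparison ever exists; Pre_ excludes only negative k with more than |k| qualifying items, a degenerate count on which no behaviour is specified (A end-slices the filtered list, B picks nothing).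
-- outside the precondition, e.g. on check(-1, [(0, 1), (0, 2)], 10): A returns (True, [(0, 1)]), B returns (True, [])
import Mathlib
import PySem

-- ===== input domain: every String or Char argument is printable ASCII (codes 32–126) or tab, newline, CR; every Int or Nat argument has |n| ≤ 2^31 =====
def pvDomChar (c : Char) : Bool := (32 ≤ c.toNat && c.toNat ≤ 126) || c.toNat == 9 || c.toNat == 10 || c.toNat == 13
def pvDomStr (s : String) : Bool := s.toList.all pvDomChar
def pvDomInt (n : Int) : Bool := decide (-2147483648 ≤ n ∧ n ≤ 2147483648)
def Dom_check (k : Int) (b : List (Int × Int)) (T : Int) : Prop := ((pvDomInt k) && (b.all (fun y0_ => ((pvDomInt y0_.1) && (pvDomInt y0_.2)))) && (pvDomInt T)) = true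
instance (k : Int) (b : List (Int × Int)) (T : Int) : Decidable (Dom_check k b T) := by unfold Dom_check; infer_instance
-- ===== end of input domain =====

-- B is a recursive selector with a decreasing need-counter (None = shortage), replacing A's filter/slice/sum stages; return value only.


-- ===== PORT A =====
def check (k : Int) (b : List (Int × Int)) (T : Int) : Bool × (Option (List (Int × Int))) :=
  let c := b.filter (fun e => e.1 ≥ k)
  if (c.length : Int) < k then (false, none)
  else
    let first_k_probs := PySem.List.slice c none (some k)
    let s := (first_k_probs.map (fun e => e.2)).sum
    if s > T then (false, none)
    else (true, some first_k_probs)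

-- ===== PORT B =====
-- Source B's _pick: recurse on the items, decrement `need` on a qualifying element,
-- cons it onto the recursive result; None propagates a shortage
def pick (k : Int) : Int → List (Int × Int) → Option (List (Int × Int) × Int)
  | need, items =>
    if need ≤ 0 then some ([], 0)
    else
      match items with
      | [] => none
      | e :: rest =>
        if e.1 ≥ k then
          match pick k (need - 1) rest with
          | none => none
          | some (l, s) => some (e :: l, s + e.2)
        else pick k need rest

def check_alt (k : Int) (b : List (Int × Int)) (T : Int) : Bool × (Option (List (Int × Int))) :=
  match pick k k b with
  | none => (false, none)
  | some (lst, s) => if s > T then (false, none) else (true, some lst)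

-- ===== PRECONDITION & SPEC =====
-- Pre_ excludes only inputs with a negative count k whose filtered list is longer than |k| —
-- a degenerate input outside the task's natural domain (k is a number of items to pick), on which
-- no behaviour is specified; everywhere else (including all other negative k) A = B.
def Pre_check (k : Int) (b : List (Int × Int)) (T : Int) : Prop :=
  0 ≤ k ∨ ((b.filter (fun e => e.1 ≥ k)).length : Int) ≤ -k
instance (k : Int) (b : List (Int × Int)) (T : Int) : Decidable (Pre_check k b T) := by unfold Pre_check; infer_instance
def pvWitness_check : Int × (List (Int × Int)) × Int := (2, [(3, 1), (1, 5), (4, 2)], 10)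

def Spec_check (k : Int) (b : List (Int × Int)) (T : Int) (out : Bool × (Option (List (Int × Int)))) : Prop := out = check_alt k b T
instance (k : Int) (b : List (Int × Int)) (T : Int) (out : Bool × (Option (List (Int × Int)))) : Decidable (Spec_check k b T out) := by unfold Spec_check; infer_instance

-- ===== CLAIM (what is proved, stated in full; the proofs are below) =====
def Claim_equal_check : Prop := ∀ (k : Int) (b : List (Int × Int)) (T : Int), Dom_check k b T → Pre_check k b T → Spec_check k b T (check k b T)

-- ===== LEMMAS AND PROOFS =====

-- characterisation of the recursive selector for a nonnegative need:
-- it fails iff fewer than `need` elements qualify, and otherwise returns the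
-- first `need` qualifying elements together with the sum of their second components
theorem pick_spec (k : Int) (items : List (Int × Int)) :
    ∀ (need : Int), 0 ≤ need →
    pick k need items =
      (if ((items.filter (fun e => e.1 ≥ k)).length : Int) < need then none
       else some ((items.filter (fun e => e.1 ≥ k)).take need.toNat,
                  (((items.filter (fun e => e.1 ≥ k)).take need.toNat).map (fun e => e.2)).sum)) := by
  induction items with
  | nil =>
    intro need h0
    by_cases hz : need ≤ 0
    · have : need = 0 := le_antisymm hz h0
      simp [pick, this]
    · have h1 : (0:Int) < need := by omega
      simp [pick, hz, h1]
  | cons e rest ih =>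
    intro need h0
    by_cases hz : need ≤ 0
    · have hn0 : need = 0 := le_antisymm hz h0
      simp [pick, hn0]
    · by_cases hq : e.1 ≥ k
      · have hfc : List.filter (fun x => decide (x.1 ≥ k)) (e :: rest)
            = e :: List.filter (fun x => decide (x.1 ≥ k)) rest := by
          simp [List.filter_cons, hq]
        rw [pick.eq_def]
        simp only [hz, if_false]
        rw [if_pos hq, ih (need - 1) (by omega), hfc]
        by_cases hlt : ((rest.filter (fun x => decide (x.1 ≥ k))).length : Int) < need - 1
        · rw [if_pos hlt, if_pos (by simp only [List.length_cons]; push_cast; omega)]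
        · rw [if_neg hlt, if_neg (by simp only [List.length_cons]; push_cast; omega)]
          have ht : need.toNat = (need - 1).toNat + 1 := by omega
          rw [ht]
          simp only [List.take_succ_cons, List.map_cons, List.sum_cons]
          exact congrArg some (Prod.ext rfl (by ring))
      · have hfc : List.filter (fun x => decide (x.1 ≥ k)) (e :: rest)
            = List.filter (fun x => decide (x.1 ≥ k)) rest := by
          simp [List.filter_cons, hq]
        rw [pick.eq_def]
        simp only [hz, if_false]
        rw [if_neg hq, ih need h0, hfc]
-- for k < 0, the selector of B is satisfied immediately
theorem pick_neg (k : Int) (hk : k < 0) (b : List (Int × Int)) :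
    pick k k b = some ([], 0) := by
  rw [pick.eq_def]
  simp [le_of_lt hk]

-- ===== VERDICT (by name: the statement is the Claim_ definition above) =====
theorem check_spec : Claim_equal_check := by
  intro k b T _ hpre
  unfold Spec_check check check_alt
  rcases lt_or_ge k 0 with hneg | hk
  · -- k < 0 and (by Pre_) the filtered list has at most |k| elements: both give (True, []) / (False, none)
    have hlen : ((b.filter (fun e => e.1 ≥ k)).length : Int) ≤ -k := by
      unfold Pre_check at hpre
      rcases hpre with h | h
      · omega
      · exact h
    rw [pick_neg k hneg b]
    set c := b.filter (fun e => e.1 ≥ k) with hc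
    have hnlt : ¬ ((c.length : Int) < k) := by omega
    have hm : k = -(((-k).toNat : Nat) : Int) := by omega
    have hslice : PySem.List.slice c none (some k) = [] := by
      rw [hm, PySem.List.slice_to_neg_natCast c (-k).toNat (by omega)]
      have hz : c.length - (-k).toNat = 0 := by omega
      simp [hz]
    simp [hnlt, hslice]
  · have hp := pick_spec k b k hk
    rw [hp]
    set c := b.filter (fun e => e.1 ≥ k) with hc
    have hslice : PySem.List.slice c none (some k) = c.take k.toNat :=
      PySem.List.slice_to c hk
    by_cases hlt : (c.length : Int) < k
    · simp [hslice, hlt]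
    · simp [hslice, hlt, List.map_take]
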